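-- pv_equiv track=rewrite | github.com/ReziChichua/Goa-homeworks | Day-78/Classwork/class.py | find_arr
-- ===== SOURCE A (Python) =====
-- def amountCheck(arr):
--     res = {}
--     for i in arr:
--         res[i] = res.get(i, 0) + 1
--     return res
--
-- def find_arr(arr_a, arr_b, rng, wanted):
--     res = []
--     count_a = amountCheck(arr_a)
--     count_b = amountCheck(arr_b)
--     for i in range(rng[0],rng[1]+1):
--         if count_a.get(i,0) > 1 and count_b.get(i,0) > 1:
--             if wanted == "even":
--                 if i % 2 == 0:
--                     res.append(i)
--             else:
--                 if i % 2 != 0: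
--                     res.append(i)
--     return res
-- ===== SOURCE B (Python) =====
-- def find_arr(arr_a, arr_b, rng, wanted):
--     lo, hi = rng[0], rng[1]
--     rem = 0 if wanted == "even" else 1
--
--     def dups(arr):
--         seen, d = set(), set()
--         for x in arr:
--             if x in seen:
--                 d.add(x)
--             else:
--                 seen.add(x)
--         return d
--
--     common = dups(arr_a) & dups(arr_b)
--     return sorted(x for x in common if lo <= x <= hi and x % 2 == rem)
-- ===== Notes on version B (the rewrite author's own statement) =====
-- stated objective: alternative
-- what changed: B never iterates the numeric range: it finds the duplicated elements of each array with a one-pass seen/dup set split, intersects the two duplicate sets, filters the few candidates by range bounds and parity, and sorts them ascending, instead of A's counting dicts plus a scan of every integer from rng[0] to rng[1].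
import Mathlib
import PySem

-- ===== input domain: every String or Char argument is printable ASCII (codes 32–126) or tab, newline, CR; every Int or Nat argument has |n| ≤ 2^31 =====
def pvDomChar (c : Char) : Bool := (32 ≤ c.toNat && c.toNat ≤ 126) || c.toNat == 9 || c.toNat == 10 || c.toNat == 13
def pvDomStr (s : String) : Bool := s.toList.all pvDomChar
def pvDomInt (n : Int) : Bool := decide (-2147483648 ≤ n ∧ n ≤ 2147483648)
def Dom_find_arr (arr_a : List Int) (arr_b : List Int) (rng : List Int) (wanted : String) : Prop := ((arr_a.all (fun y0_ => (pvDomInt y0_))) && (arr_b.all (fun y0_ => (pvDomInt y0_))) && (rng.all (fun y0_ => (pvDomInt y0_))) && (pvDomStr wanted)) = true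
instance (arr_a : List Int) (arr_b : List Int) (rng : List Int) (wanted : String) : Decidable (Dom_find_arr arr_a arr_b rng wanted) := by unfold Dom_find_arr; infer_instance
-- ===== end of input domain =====

-- B replaces A's scan of every integer in [rng[0], rng[1]] by a seen/dup set pass over each
-- array, a set intersection and a sort of the few surviving candidates (alternative algorithm).

-- ===== PORT A =====
def amountCheck (arr : List Int) : PySem.Dict Int Int :=
  arr.foldl (fun res i => res.insert i (res.getD i 0 + 1)) PySem.Dict.empty

def find_arr (arr_a : List Int) (arr_b : List Int) (rng : List Int) (wanted : String) : List Int :=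
  let count_a := amountCheck arr_a
  let count_b := amountCheck arr_b
  (PySem.List.pyRange (PySem.List.pyGetD rng 0 0) (PySem.List.pyGetD rng 1 0 + 1) 1).foldl
    (fun res i =>
      if count_a.getD i 0 > 1 ∧ count_b.getD i 0 > 1 then
        if wanted = "even" then
          if PySem.Int.mod i 2 = 0 then res ++ [i] else res
        else
          if PySem.Int.mod i 2 ≠ 0 then res ++ [i] else res
      else res) []

-- ===== PORT B =====
-- one step of B's seen/dup loop
def dupStep (st : PySem.Set Int × PySem.Set Int) (x : Int) : PySem.Set Int × PySem.Set Int :=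
  if PySem.Set.contains st.1 x then (st.1, PySem.Set.add st.2 x)
  else (PySem.Set.add st.1 x, st.2)

def dups (arr : List Int) : PySem.Set Int :=
  (arr.foldl dupStep (PySem.Set.empty, PySem.Set.empty)).2

def find_arr_alt (arr_a : List Int) (arr_b : List Int) (rng : List Int) (wanted : String) : List Int :=
  let lo := PySem.List.pyGetD rng 0 0
  let hi := PySem.List.pyGetD rng 1 0
  let rem : Int := if wanted = "even" then 0 else 1
  let common := PySem.Set.inter (dups arr_a) (dups arr_b)
  PySem.List.sorted
    (common.filter (fun x => decide (lo ≤ x ∧ x ≤ hi ∧ PySem.Int.mod x 2 = rem)))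
    (fun x => x) false

-- ===== PRECONDITION & SPEC =====
-- A raises IndexError (rng[0] / rng[1]) when rng has fewer than two elements; B raises there too.
def Pre_find_arr (arr_a : List Int) (arr_b : List Int) (rng : List Int) (wanted : String) : Prop :=
  2 ≤ rng.length
instance (arr_a : List Int) (arr_b : List Int) (rng : List Int) (wanted : String) : Decidable (Pre_find_arr arr_a arr_b rng wanted) := by unfold Pre_find_arr; infer_instance

def pvWitness_find_arr : List Int × List Int × List Int × String := ([1, 1, 2], [1, 1], [0, 2], "odd")

def Spec_find_arr (arr_a : List Int) (arr_b : List Int) (rng : List Int) (wanted : String) (out : List Int) : Prop := out = find_arr_alt arr_a arr_b rng wanted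
instance (arr_a : List Int) (arr_b : List Int) (rng : List Int) (wanted : String) (out : List Int) : Decidable (Spec_find_arr arr_a arr_b rng wanted out) := by unfold Spec_find_arr; infer_instance

-- ===== CLAIM (what is proved, stated in full; the proofs are below) =====
def Claim_equal_find_arr : Prop := ∀ (arr_a : List Int) (arr_b : List Int) (rng : List Int) (wanted : String), Dom_find_arr arr_a arr_b rng wanted → Pre_find_arr arr_a arr_b rng wanted → Spec_find_arr arr_a arr_b rng wanted (find_arr arr_a arr_b rng wanted)

-- ===== LEMMAS AND PROOFS =====

/-- Invariant of B's seen/dup fold: `.1` collects all elements seen, `.2` the duplicated ones. -/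
lemma dupsFold_mem (arr : List Int) : ∀ (s d : List Int) (y : Int),
    (y ∈ (arr.foldl dupStep (s, d)).1 ↔ y ∈ s ∨ y ∈ arr)
    ∧ (y ∈ (arr.foldl dupStep (s, d)).2 ↔ y ∈ d ∨ (y ∈ s ∧ y ∈ arr) ∨ 2 ≤ arr.count y) := by
  induction arr with
  | nil => intro s d y; simp
  | cons x t ih =>
    intro s d y
    simp only [List.foldl_cons, dupStep]
    by_cases hx : x ∈ s
    · rw [if_pos (by simpa [PySem.Set.contains_iff] using hx)]
      obtain ⟨h1, h2⟩ := ih s (PySem.Set.add d x) y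
      constructor
      · rw [h1]
        by_cases hyx : y = x <;> simp [hyx, hx, List.mem_cons]
      · rw [h2, PySem.Set.mem_add]
        by_cases hyx : y = x
        · subst hyx
          constructor
          · intro _; exact Or.inr (Or.inl ⟨hx, List.mem_cons_self⟩)
          · intro _; exact Or.inl (Or.inr rfl)
        · simp [List.mem_cons, hyx, Ne.symm hyx]
    · rw [if_neg (by simpa [PySem.Set.contains_iff] using hx)]
      obtain ⟨h1, h2⟩ := ih (PySem.Set.add s x) d y
      constructor
      · rw [h1, PySem.Set.mem_add]
        by_cases hyx : y = x <;> simp [hyx, List.mem_cons]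
      · rw [h2, PySem.Set.mem_add]
        by_cases hyx : y = x
        · subst hyx
          constructor
          · rintro (h | ⟨_, ht⟩ | h)
            · exact Or.inl h
            · refine Or.inr (Or.inr ?_)
              rw [List.count_cons_self]
              have := List.count_pos_iff.mpr ht; omega
            · refine Or.inr (Or.inr ?_); rw [List.count_cons_self]; omega
          · rintro (h | ⟨hs, _⟩ | h)
            · exact Or.inl h
            · exact absurd hs hx
            · rw [List.count_cons_self] at h
              have ht : y ∈ t := List.count_pos_iff.mp (by omega)
              exact Or.inr (Or.inl ⟨(by simp), ht⟩)
        · simp [List.mem_cons, hyx, Ne.symm hyx]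

lemma dupsFold_nodup (arr : List Int) : ∀ (s d : List Int), d.Nodup →
    (arr.foldl dupStep (s, d)).2.Nodup := by
  induction arr with
  | nil => intro s d hd; simpa using hd
  | cons x t ih =>
    intro s d hd
    simp only [List.foldl_cons, dupStep]
    by_cases hx : PySem.Set.contains s x = true
    · rw [if_pos hx]; exact ih _ _ (PySem.Set.nodup_add _ _ hd)
    · rw [if_neg hx]; exact ih _ _ hd

lemma mem_dups (arr : List Int) (y : Int) : y ∈ dups arr ↔ 2 ≤ arr.count y := by
  have := (dupsFold_mem arr PySem.Set.empty PySem.Set.empty y).2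
  simpa [dups, PySem.Set.empty] using this

lemma nodup_dups (arr : List Int) : (dups arr).Nodup :=
  dupsFold_nodup arr PySem.Set.empty PySem.Set.empty (by simp [PySem.Set.empty])

/-- A's range loop is a filter of the range. -/
lemma find_arr_eq_filter (arr_a arr_b rng : List Int) (wanted : String) :
    find_arr arr_a arr_b rng wanted =
      (PySem.List.pyRange (PySem.List.pyGetD rng 0 0) (PySem.List.pyGetD rng 1 0 + 1) 1).filter
        (fun i => decide ((1 < (amountCheck arr_a).getD i 0 ∧ 1 < (amountCheck arr_b).getD i 0) ∧
          (if wanted = "even" then PySem.Int.mod i 2 = 0 else PySem.Int.mod i 2 ≠ 0))) := by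
  unfold find_arr
  have hb : (fun (res : List Int) (i : Int) =>
      if (amountCheck arr_a).getD i 0 > 1 ∧ (amountCheck arr_b).getD i 0 > 1 then
        if wanted = "even" then
          if PySem.Int.mod i 2 = 0 then res ++ [i] else res
        else
          if PySem.Int.mod i 2 ≠ 0 then res ++ [i] else res
      else res)
      = (fun res i =>
        if ((1 < (amountCheck arr_a).getD i 0 ∧ 1 < (amountCheck arr_b).getD i 0) ∧
            (if wanted = "even" then PySem.Int.mod i 2 = 0 else PySem.Int.mod i 2 ≠ 0)) then
          res ++ [i] else res) := by
    funext res i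
    split_ifs <;> tauto
  simp only [hb]
  rw [PySem.List.foldl_append_ite_eq_filter]
  simp

lemma count_amountCheck (arr : List Int) (v : Int) :
    (amountCheck arr).getD v 0 = (arr.count v : Int) := by
  rw [amountCheck, PySem.Dict.foldl_insert_getD_add_one_eq_counter, PySem.Dict.getD_counter]

-- ===== VERDICT (by name: the statement is the Claim_ definition above) =====
theorem find_arr_spec : Claim_equal_find_arr := by
  unfold Claim_equal_find_arr
  intro arr_a arr_b rng wanted _ _
  unfold Spec_find_arr find_arr_alt
  set lo := PySem.List.pyGetD rng 0 0 with hlo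
  set hi := PySem.List.pyGetD rng 1 0 with hhi
  rw [find_arr_eq_filter]
  symm
  apply PySem.List.sorted_eq_of_perm_of_pairwise_lt
  · -- permutation: same members, both nodup
    rw [List.perm_ext_iff_of_nodup
      (List.Nodup.filter _ (PySem.List.nodup_pyRange_one lo (hi + 1)))
      (List.Nodup.filter _ (PySem.Set.nodup_inter _ _ (nodup_dups arr_a)))]
    intro y
    simp only [List.mem_filter, PySem.List.mem_pyRange_one, PySem.Set.mem_inter, mem_dups,
      decide_eq_true_eq]
    have h2 : (0 : Int) < 2 := by norm_num
    have hnn := PySem.Int.mod_nonneg y h2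
    have hlt := PySem.Int.mod_lt y h2
    constructor
    · rintro ⟨⟨hy1, hy2⟩, ⟨ha, hb⟩, hpar⟩
      rw [count_amountCheck] at ha hb
      refine ⟨⟨by exact_mod_cast ha, by exact_mod_cast hb⟩, hy1, by omega, ?_⟩
      split_ifs at hpar ⊢ <;> omega
    · rintro ⟨⟨ha, hb⟩, hy1, hy2, hpar⟩
      refine ⟨⟨hy1, by omega⟩, ⟨?_, ?_⟩, ?_⟩
      · rw [count_amountCheck]; exact_mod_cast ha
      · rw [count_amountCheck]; exact_mod_cast hb
      · split_ifs at hpar ⊢ <;> omega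
  · -- the filtered range is strictly increasing
    exact List.Pairwise.filter _ (PySem.List.pairwise_lt_pyRange_one lo (hi + 1))
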